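/- GENERATED by farm/mkstatement.py from design/units.tsv (unit `codebook_decode_deinterleave_repeat.5`) and the assertions of Vorbis/Spec/Codebook/Deint.lean — do not edit.
   THE STATEMENT of the proof unit `codebook_decode_deinterleave_repeat.5`: segment 5 of `codebook_decode_deinterleave_repeat` (1 instructions; entries 0x10de04;
   exits 0x10de09; ranges 0x10de04-0x10de04)
   takes each of its entry assertions to one of its exit assertions (`Vorbis.Spec.Deint.Claim5`), given the contracts of its callees.
   What the names mean: Vorbis/Spec/Basic.lean (the shared hypotheses), Vorbis/Spec/Codebook/Deint.lean (the assertions). The theorem to prove: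
   `theorem codebook_decode_deinterleave_repeat_5_ok : Vorbis.Spec.codebook_decode_deinterleave_repeat_5.Statement`. -/
import Vorbis.Spec.Codebook.Deint
namespace Vorbis.Spec.codebook_decode_deinterleave_repeat_5
open X86 X86.User Asan

/-- The statement of unit `codebook_decode_deinterleave_repeat.5`. -/
def Statement : Prop :=
  ∀ (Lay : Layout) (_hLay : Lay.hi = 0x1000000) (μ : Microarch) (_hμ : UserX.MicroOK μ) (u₀ : State)
    (_hcode : HasCodeNat Lay u₀ Vorbis.L.codebook_decode_deinterleave_repeat.entry Vorbis.Code.code_codebook_decode_deinterleave_repeat.nat Vorbis.L.codebook_decode_deinterleave_repeat.size),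
    Vorbis.Spec.Deint.Claim5 Lay μ u₀

end Vorbis.Spec.codebook_decode_deinterleave_repeat_5
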